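-- pv_equiv track=rewrite | github.com/Shreykc1/dsa | kmp.py | findLPS
-- ===== SOURCE A (Python) =====
-- def findLPS(pattern):
--     chars = set()
--     lps = []
--
--     for i in pattern:
--         if i in chars:
--             lps.append(lps[-1]+1)
--         else:
--             lps.append(0)
--         chars.add(i)
--     return lps
-- ===== SOURCE B (Python) =====
-- def findLPS(pattern):
--     out = []
--     seen = set()
--     n = len(pattern)
--     i = 0
--     while i < n:
--         # pattern[i] has not been seen before: it starts a new run
--         seen.add(pattern[i])
--         j = i + 1
--         while j < n and pattern[j] in seen:
--             seen.add(pattern[j])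
--             j += 1
--         out.extend(range(j - i))
--         i = j
--     return out
-- ===== Notes on version B (the rewrite author's own statement) =====
-- stated objective: alternative
-- what changed: Replaces A's single per-character pass that appends lps[-1]+1 or 0 with a run-based nested loop: the outer loop starts at each first occurrence, an inner scan measures the maximal run of already-seen characters, and each run is emitted wholesale as range(run length) instead of per-character arithmetic on the output list.
import Mathlib
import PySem

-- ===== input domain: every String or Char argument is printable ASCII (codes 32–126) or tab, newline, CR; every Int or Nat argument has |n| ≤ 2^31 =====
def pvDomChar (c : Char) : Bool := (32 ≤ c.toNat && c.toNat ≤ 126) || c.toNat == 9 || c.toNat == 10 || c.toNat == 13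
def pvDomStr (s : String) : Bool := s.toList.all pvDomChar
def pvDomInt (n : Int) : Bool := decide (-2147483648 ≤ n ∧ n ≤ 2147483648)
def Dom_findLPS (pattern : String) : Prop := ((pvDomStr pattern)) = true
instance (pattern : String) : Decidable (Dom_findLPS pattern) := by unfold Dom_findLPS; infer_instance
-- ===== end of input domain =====

-- B replaces A's per-character pass (appending lps[-1]+1 or 0) with a run-based nested loop
-- emitting each maximal run of already-seen characters as range(run length); alternative
-- decomposition, same cost.

-- ===== PORT A =====
-- lps[-1]+1: the branch is only reached when lps is nonempty (the first occurrence of any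
-- char takes the else branch), so getLast?.getD 0 agrees with Python's lps[-1] there.
def findLPS (pattern : String) : List Int :=
  (pattern.toList.foldl (fun st c =>
    if PySem.Set.contains st.1 c then
      (PySem.Set.add st.1 c, st.2 ++ [st.2.getLast?.getD 0 + 1])
    else
      (PySem.Set.add st.1 c, st.2 ++ [(0 : Int)]))
    (PySem.Set.empty, ([] : List Int))).2

-- ===== PORT B =====
-- inner 'while j < n and pattern[j] in seen' loop, consuming the list from position j:
-- returns (run length j-i-1, remaining suffix starting at j, the grown seen set)
def findLPS_takeRun : List Char → PySem.Set Char → Nat × List Char × PySem.Set Char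
  | [], S => (0, [], S)
  | c :: cs, S =>
    if PySem.Set.contains S c then
      let r := findLPS_takeRun cs (PySem.Set.add S c)
      (r.1 + 1, r.2.1, r.2.2)
    else (0, c :: cs, S)

theorem findLPS_takeRun_len : ∀ (cs : List Char) (S : PySem.Set Char),
    (findLPS_takeRun cs S).2.1.length ≤ cs.length := by
  intro cs
  induction cs with
  | nil => intro S; simp [findLPS_takeRun]
  | cons c cs ih =>
    intro S
    simp only [findLPS_takeRun]
    split
    · exact le_trans (ih _) (Nat.le_succ _)
    · exact le_refl _

-- outer 'while i < n' loop: each step starts a run at a first occurrence and emits range(j-i)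
def findLPS_runs : List Char → PySem.Set Char → List Int
  | [], _ => []
  | c :: cs, S =>
    let r := findLPS_takeRun cs (PySem.Set.add S c)
    PySem.List.pyRange 0 ((r.1 : Int) + 1) 1 ++ findLPS_runs r.2.1 r.2.2
termination_by cs _ => cs.length
decreasing_by
  exact Nat.lt_succ_of_le (findLPS_takeRun_len cs (PySem.Set.add S c))

def findLPS_alt (pattern : String) : List Int :=
  findLPS_runs pattern.toList PySem.Set.empty

-- ===== PRECONDITION & SPEC =====
def Spec_findLPS (pattern : String) (out : List Int) : Prop := out = findLPS_alt pattern
instance (pattern : String) (out : List Int) : Decidable (Spec_findLPS pattern out) := by unfold Spec_findLPS; infer_instance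

-- ===== CLAIM (what is proved, stated in full; the proofs are below) =====
def Claim_equal_findLPS : Prop := ∀ (pattern : String), Dom_findLPS pattern → Spec_findLPS pattern (findLPS pattern)

-- ===== LEMMAS AND PROOFS =====

-- reference recursion: the value appended at each char, with the running streak fused in
def specLPS : List Char → PySem.Set Char → Int → List Int
  | [], _, _ => []
  | c :: cs, S, p =>
    if PySem.Set.contains S c then (p + 1) :: specLPS cs (PySem.Set.add S c) (p + 1)
    else 0 :: specLPS cs (PySem.Set.add S c) 0

-- A's fold equals the reference, with the streak carried as the last emitted value
theorem findLPS_foldl_eq_spec (cs : List Char) (S : PySem.Set Char) (lps : List Int) :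
    (cs.foldl (fun st c =>
      if PySem.Set.contains st.1 c then
        (PySem.Set.add st.1 c, st.2 ++ [st.2.getLast?.getD 0 + 1])
      else
        (PySem.Set.add st.1 c, st.2 ++ [(0 : Int)]))
      (S, lps)).2
    = lps ++ specLPS cs S (lps.getLast?.getD 0) := by
  induction cs generalizing S lps with
  | nil => simp [specLPS]
  | cons c cs ih =>
    rw [List.foldl_cons]
    by_cases h : PySem.Set.contains S c = true
    · rw [if_pos h, ih]
      simp only [specLPS, if_pos h, List.getLast?_concat, Option.getD_some]
      simp
    · rw [if_neg h, ih]
      simp only [specLPS, if_neg h, List.getLast?_concat, Option.getD_some]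
      simp

-- the streak argument is irrelevant when the head (if any) is unseen
theorem specLPS_indep (l : List Char) (S : PySem.Set Char) (a b : Int)
    (h : ∀ c' l', l = c' :: l' → PySem.Set.contains S c' = false) :
    specLPS l S a = specLPS l S b := by
  cases l with
  | nil => rfl
  | cons c cs =>
    have hc : ¬ PySem.Set.contains S c = true := by
      rw [h c cs rfl]; exact Bool.false_ne_true
    simp only [specLPS]
    rw [if_neg hc, if_neg hc]

-- takeRun never stops in the middle of a run: the head of the rest is unseen
theorem findLPS_takeRun_rest (cs : List Char) (S : PySem.Set Char) :
    ∀ c' cs', (findLPS_takeRun cs S).2.1 = c' :: cs' →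
      PySem.Set.contains (findLPS_takeRun cs S).2.2 c' = false := by
  induction cs generalizing S with
  | nil => intro c' cs' h; simp [findLPS_takeRun] at h
  | cons c cs ih =>
    intro c' cs' h
    simp only [findLPS_takeRun] at *
    by_cases hc : PySem.Set.contains S c = true
    · rw [if_pos hc] at h ⊢
      exact ih _ _ _ h
    · rw [if_neg hc] at h ⊢
      cases h
      simpa using Bool.of_not_eq_true hc

-- the reference expands a run of seen characters to the consecutive values p+1, p+2, …
theorem specLPS_run (cs : List Char) (S : PySem.Set Char) (p : Int) :
    specLPS cs S p
      = PySem.List.pyRange (p + 1) (p + 1 + ((findLPS_takeRun cs S).1 : Int)) 1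
        ++ specLPS (findLPS_takeRun cs S).2.1 (findLPS_takeRun cs S).2.2 p := by
  induction cs generalizing S p with
  | nil => simp [findLPS_takeRun, specLPS, PySem.List.pyRange_one_eq_nil]
  | cons c cs ih =>
    simp only [specLPS, findLPS_takeRun]
    by_cases hc : PySem.Set.contains S c = true
    · rw [if_pos hc, if_pos hc]
      dsimp only
      rw [ih (PySem.Set.add S c) (p + 1)]
      have hb : (p + 1 + (((findLPS_takeRun cs (PySem.Set.add S c)).1 + 1 : Nat) : Int))
          = p + 1 + 1 + ((findLPS_takeRun cs (PySem.Set.add S c)).1 : Int) := by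
        push_cast; ring
      rw [hb]
      have hlt : p + 1 < p + 1 + 1 + ((findLPS_takeRun cs (PySem.Set.add S c)).1 : Int) := by
        omega
      conv_rhs => rw [PySem.List.pyRange_one_cons hlt]
      rw [List.cons_append]
      congr 2
      exact specLPS_indep _ _ _ _ (findLPS_takeRun_rest cs (PySem.Set.add S c))
    · rw [if_neg hc, if_neg hc]
      have hm : PySem.List.pyRange (p + 1) (p + 1 + ((0 : Nat) : Int)) 1 = [] :=
        PySem.List.pyRange_one_eq_nil (by omega)
      rw [hm, List.nil_append]
      simp only [specLPS]
      rw [if_neg hc]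

-- B's run loop equals the reference whenever the head (if any) is unseen
theorem findLPS_runs_eq_spec : ∀ (cs : List Char) (S : PySem.Set Char),
    (∀ c' cs', cs = c' :: cs' → PySem.Set.contains S c' = false) →
    findLPS_runs cs S = specLPS cs S 0 := by
  intro cs
  induction hn : cs.length using Nat.strong_induction_on generalizing cs with
  | _ n ih =>
    cases cs with
    | nil => intro S _; simp [findLPS_runs, specLPS]
    | cons c cs =>
      intro S hhead
      have hc : ¬ PySem.Set.contains S c = true := by
        rw [hhead c cs rfl]; exact Bool.false_ne_true
      rw [findLPS_runs]
      simp only [specLPS]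
      rw [if_neg hc]
      rw [specLPS_run cs (PySem.Set.add S c) 0]
      have hrec : findLPS_runs (findLPS_takeRun cs (PySem.Set.add S c)).2.1
            (findLPS_takeRun cs (PySem.Set.add S c)).2.2
          = specLPS (findLPS_takeRun cs (PySem.Set.add S c)).2.1
            (findLPS_takeRun cs (PySem.Set.add S c)).2.2 0 := by
        subst hn
        exact ih _ (Nat.lt_succ_of_le (findLPS_takeRun_len cs (PySem.Set.add S c))) _ rfl _
          (findLPS_takeRun_rest cs (PySem.Set.add S c))
      rw [hrec]
      have hb2 : (0 : Int) + 1 + ((findLPS_takeRun cs (PySem.Set.add S c)).1 : Int)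
          = ((findLPS_takeRun cs (PySem.Set.add S c)).1 : Int) + 1 := by ring
      rw [hb2]
      have hlt : (0 : Int) < ((findLPS_takeRun cs (PySem.Set.add S c)).1 : Int) + 1 := by
        positivity
      rw [PySem.List.pyRange_one_cons hlt, List.cons_append]

theorem findLPS_spec : Claim_equal_findLPS := by
  intro p _
  show findLPS p = findLPS_alt p
  unfold findLPS findLPS_alt
  rw [findLPS_foldl_eq_spec]
  rw [findLPS_runs_eq_spec p.toList PySem.Set.empty (by intro c' cs' _; rfl)]
  simp
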